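-- pv_equiv track=rewrite | github.com/Dhivyno/UCI-ICS-32A-projects-and-exercises | reinforcement_exercise2/problem2.py | first_chars
-- ===== SOURCE A (Python) =====
-- def first_chars(strings: list[str]) -> str:
--     if not strings:
--         return ""
--     leading = strings[0]
--     if type(leading) == str:
--         return leading[0] + first_chars(strings[1:])
--     elif type(leading) == list:
--         return first_chars(leading) + first_chars(strings[1:])
-- ===== SOURCE B (Python) =====
-- def first_chars(strings: list[str]) -> str:
--     # Iterative flatten with an explicit stack; also handles the nested-list
--     # inputs A accepts, in the same order.
--     stack = list(reversed(strings))
--     chars = []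
--     while stack:
--         item = stack.pop()
--         if type(item) == str:
--             chars.append(item[0])
--         elif type(item) == list:
--             stack.extend(reversed(item))
--     return "".join(chars)
-- ===== Notes on version B (the rewrite author's own statement) =====
-- stated objective: faster
-- what changed: Replaces A's recursion that re-slices the remaining list and concatenates strings at every step with an explicit-stack iterative flatten that collects first characters into a list and joins once; B matches A on nested-list inputs too (nested lists are outside the List[str] type convention, so the Lean claim covers the flat case).
import Mathlib
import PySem

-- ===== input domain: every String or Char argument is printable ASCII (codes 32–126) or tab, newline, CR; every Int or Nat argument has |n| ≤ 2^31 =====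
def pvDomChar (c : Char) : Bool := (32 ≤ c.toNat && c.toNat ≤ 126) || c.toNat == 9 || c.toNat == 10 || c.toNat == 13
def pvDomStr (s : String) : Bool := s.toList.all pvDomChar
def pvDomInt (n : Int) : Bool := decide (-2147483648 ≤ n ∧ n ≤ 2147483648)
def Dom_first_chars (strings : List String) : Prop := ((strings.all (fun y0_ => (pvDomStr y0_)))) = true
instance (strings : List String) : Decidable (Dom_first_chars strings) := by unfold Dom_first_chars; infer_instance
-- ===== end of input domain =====

-- B replaces A's re-slicing recursion with an explicit-stack flatten that collects first
-- characters and joins once (return-value equivalence on the flat List String domain).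
-- ===== PORT A =====
def first_chars (strings : List String) : String :=
  match strings with
  | [] => ""
  | leading :: rest =>
    -- type(leading) == str always holds on List String; leading[0] (IndexError on "" excluded by Pre_)
    (match PySem.Str.pyGet? leading 0 with
     | some c => String.ofList [c]
     | none => "")
    ++ first_chars rest   -- strings[1:] is rest

-- ===== PORT B =====
-- The Python stack is list(reversed(strings)) with pop from the END; here the Lean list's
-- HEAD is the stack top, so the stack starts as `strings` itself. On List String the
-- `type(item) == list` branch of Source B is unreachable and has no counterpart.
def fcLoop : List String → List Char → List Char
  | [], chars => chars
  | item :: stack, chars =>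
    fcLoop stack (chars ++ (match PySem.Str.pyGet? item 0 with
                            | some c => [c]
                            | none => []))

def first_chars_alt (strings : List String) : String :=
  String.ofList (fcLoop strings [])   -- "".join(chars)

-- ===== PRECONDITION & SPEC =====
-- Pre_ excludes lists containing an empty string: there A (and B alike) raise IndexError on item[0].
def Pre_first_chars (strings : List String) : Prop := ∀ s ∈ strings, s ≠ ""
instance (strings : List String) : Decidable (Pre_first_chars strings) := by unfold Pre_first_chars; infer_instance
def pvWitness_first_chars : List String := ["abc", "x", "hi"]
def Spec_first_chars (strings : List String) (out : String) : Prop := out = first_chars_alt strings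
instance (strings : List String) (out : String) : Decidable (Spec_first_chars strings out) := by unfold Spec_first_chars; infer_instance

-- ===== CLAIM =====
def Claim_equal_first_chars : Prop := ∀ (strings : List String), Dom_first_chars strings → Pre_first_chars strings → Spec_first_chars strings (first_chars strings)

-- ===== LEMMAS AND PROOFS =====
theorem fcLoop_append (st : List String) (ch : List Char) :
    fcLoop st ch = ch ++ fcLoop st [] := by
  induction st generalizing ch with
  | nil => simp [fcLoop]
  | cons s rest ih =>
    rw [fcLoop, fcLoop, ih, ih (([] : List Char) ++ _)]
    simp

theorem first_chars_toList (strings : List String) :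
    (first_chars strings).toList = fcLoop strings [] := by
  induction strings with
  | nil => simp [first_chars, fcLoop]
  | cons s rest ih =>
    rw [fcLoop, fcLoop_append, first_chars]
    cases h : PySem.Str.pyGet? s 0 <;> simp [h, ih]

-- ===== VERDICT =====
theorem first_chars_spec : Claim_equal_first_chars := by
  intro strings _ _
  unfold Spec_first_chars first_chars_alt
  rw [← first_chars_toList strings, String.ofList_toList]
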